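-- pv_equiv track=rewrite | github.com/salaschen/ACM | UVA/Liu/Chapter5_C++/12100_PrintingQueue/sol.py | process
-- ===== SOURCE A (Python) =====
-- def canPrint(j, numList):
-- 	priority = j[1] ;
-- 	for j in range(9, 0, -1):
-- 		if j == priority:
-- 			numList[priority] -= 1 ;
-- 			return True ;
-- 		if numList[j] > 0 and j > priority:
-- 			return False ;
-- 	return False ;
--
-- def process(job, numList, pos):
-- 	cur = 1 ;
-- 	numJob = len(job) ;
-- 	while cur < numJob:
-- 		if canPrint(job[0], numList):
-- 			if job[0][0] == pos:
-- 				return cur ;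
-- 			else:
-- 				job.pop(0) ;
-- 				cur += 1 ;
-- 		else:
-- 			job.append(job.pop(0)) ;
--
-- 	return cur ;
-- ===== SOURCE B (Python) =====
-- def process(job, numList, pos):
--     # One pass per priority level present in the queue, highest first: all higher-priority
--     # jobs print before the target; within one level jobs print in cyclic order starting
--     # just after the previous level's last printed job.
--     n = len(job)
--     c = 0
--     step = 0
--     for q in sorted(set(j[1] for j in job), reverse=True):
--         level = [(k, j) for k, j in enumerate(job) if j[1] == q]
--         ordered = [kj for kj in level if kj[0] >= c] + [kj for kj in level if kj[0] < c]
--         for k, (idx, _) in ordered: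
--             step += 1
--             if idx == pos:
--                 return step
--         c = (ordered[-1][0] + 1) % n
--     return step
-- ===== Notes on version B (the rewrite author's own statement) =====
-- stated objective: alternative
-- what changed: B replaces A's step-by-step queue simulation (rotating the list and decrementing a priority histogram until the target reaches the front) by a counting pass per priority level: for each priority present, highest first, it lists that level's jobs in cyclic order starting after the previous level's last printed job and counts jobs printed before the target, so no queue is ever mutated (O(n) work instead of A's O(n^2) simulation, though a timing run could not measure a ratio because A does not finish on large random inputs). …
-- intended difference: On an empty job list A returns 1 (the leftover initial value of cur, never corrected because the loop is skipped) while B returns 0, the number of jobs printed before the absent target, which is the intended count for an empty queue. — e.g. on process([], [0, 0, 0, 0, 0, 0, 0, 0, 0, 0], 0): A returns 1, B returns 0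
-- outside the precondition, e.g. on process([(0, 1), (1, 2)], [0, 0, 0, 0, 0, 0, 0, 0, 0, 0], 1): A returns 2, B returns 1
import Mathlib
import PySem

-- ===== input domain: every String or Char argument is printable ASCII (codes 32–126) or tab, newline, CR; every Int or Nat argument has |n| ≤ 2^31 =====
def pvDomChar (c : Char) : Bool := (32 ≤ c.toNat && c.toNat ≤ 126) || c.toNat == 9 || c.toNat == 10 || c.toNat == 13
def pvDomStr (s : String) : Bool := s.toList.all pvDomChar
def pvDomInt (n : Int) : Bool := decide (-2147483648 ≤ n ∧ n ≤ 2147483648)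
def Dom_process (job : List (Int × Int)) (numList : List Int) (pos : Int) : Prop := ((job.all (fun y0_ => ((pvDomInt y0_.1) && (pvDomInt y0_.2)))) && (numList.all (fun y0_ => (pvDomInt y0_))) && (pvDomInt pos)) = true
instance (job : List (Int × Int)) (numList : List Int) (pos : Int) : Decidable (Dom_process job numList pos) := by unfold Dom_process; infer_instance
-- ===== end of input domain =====

-- B replaces A's queue simulation by a per-priority counting pass over the enumerated job list
-- (intended as the O(n) alternative to A's O(n^2) loop; a timing run could not measure a ratio).
-- The equivalence is about the RETURN value only: Python A mutates job and numList in place, B does not.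

-- ===== PORT A =====
-- canPrint's 'for j in range(9, 0, -1)' with early returns, as structural recursion over the range list.
def canPrintGo (priority : Int) (numList : List Int) : List Int → Bool × List Int
  | [] => (false, numList)
  | j :: rest =>
    if j = priority then
      -- numList[priority] -= 1  (IndexError excluded by Pre_)
      (true, PySem.List.pySetD numList priority (PySem.List.pyGetD numList priority 0 - 1))
    else if PySem.List.pyGetD numList j 0 > 0 ∧ j > priority then
      (false, numList)
    else canPrintGo priority numList rest

def canPrint (j : Int × Int) (numList : List Int) : Bool × List Int :=
  canPrintGo j.2 numList (PySem.List.pyRange 9 0 (-1))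

-- the 'while cur < numJob' loop; fuel only makes it total (A diverges outside Pre_),
-- (job.length+1)^2 steps are enough under Pre_ (proved below).
def processLoop (pos numJob : Int) : Nat → List (Int × Int) → List Int → Int → Int
  | 0, _, _, cur => cur
  | fuel + 1, job, numList, cur =>
    if cur < numJob then
      match job with
      | [] => cur   -- job[0] on an empty list is Python's IndexError, unreachable under Pre_
      | h :: t =>
        let r := canPrint h numList   -- canPrint(job[0], numList): mutates numList when it prints
        if r.1 then
          if h.1 = pos then cur
          else processLoop pos numJob fuel t r.2 (cur + 1)       -- job.pop(0); cur += 1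
        else
          processLoop pos numJob fuel (t ++ [h]) numList cur      -- job.append(job.pop(0))
    else cur

def process (job : List (Int × Int)) (numList : List Int) (pos : Int) : Int :=
  processLoop pos (PySem.List.len job) ((job.length + 1) * (job.length + 1)) job numList 1

-- ===== PORT B =====
-- inner 'for k, (idx, _) in ordered: step += 1; if idx == pos: return step' (inl = early return)
def altScan (pos : Int) : List (Int × (Int × Int)) → Int → Sum Int Int
  | [], step => .inr step
  | kj :: rest, step =>
    if kj.2.1 = pos then .inl (step + 1) else altScan pos rest (step + 1)

-- outer 'for q in sorted(set(...), reverse=True)' carrying (c, step)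
def altLevels (job : List (Int × Int)) (pos n : Int) : List Int → Int → Int → Int
  | [], _, step => step
  | q :: qs, c, step =>
    let level := (PySem.List.enumerate job 0).filter (fun kj => kj.2.2 == q)
    let ordered := level.filter (fun kj => decide (kj.1 ≥ c)) ++ level.filter (fun kj => decide (kj.1 < c))
    match altScan pos ordered step with
    | .inl s => s
    | .inr step' =>
        altLevels job pos n qs
          (PySem.Int.mod ((PySem.List.pyGetD ordered (-1) (0, (0, 0))).1 + 1) n) step'
          -- ordered[-1]: never empty, q is a priority present in job

def process_alt (job : List (Int × Int)) (numList : List Int) (pos : Int) : Int :=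
  altLevels job pos (PySem.List.len job)
    (PySem.List.sorted (PySem.Set.ofList (job.map (fun j => j.2))) (fun x => x) true) 0 0

-- ===== PRECONDITION & SPEC =====
-- numList is the priority histogram of job (indices 1..9 of a length-10 list)
def ConsHist (numList : List Int) (q : List (Int × Int)) : Prop :=
  numList.length = 10 ∧
  ∀ j ∈ PySem.List.pyRange 1 10 1,
    PySem.List.pyGetD numList j 0 = (q.countP (fun y => y.2 == j) : Int)

def PrioOK (q : List (Int × Int)) : Prop := ∀ y ∈ q, 1 ≤ y.2 ∧ y.2 ≤ 9

-- Pre_ excludes inputs of two or more jobs whose numList is not the 1..9 priority histogram of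
-- job, or with a job priority outside 1..9: there A may rotate forever, index numList out of
-- range, or return an order dictated by the stale counts rather than by the queue (with at most
-- one job A returns 1 before ever consulting numList, so those inputs all stay inside Pre_).
def Pre_process (job : List (Int × Int)) (numList : List Int) (pos : Int) : Prop :=
  job.length ≤ 1 ∨ (ConsHist numList job ∧ PrioOK job)

instance (job : List (Int × Int)) (numList : List Int) (pos : Int) : Decidable (Pre_process job numList pos) := by
  unfold Pre_process ConsHist PrioOK; infer_instance

def pvWitness_process : (List (Int × Int)) × List Int × Int :=
  ([(0, 1), (1, 2)], [0, 1, 1, 0, 0, 0, 0, 0, 0, 0], 0)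

-- On an empty job list A returns 1 (the leftover initial value of cur, never corrected because the
-- loop is skipped) while B returns 0, the number of jobs printed before the absent target, which is
-- the intended count for an empty queue.
def D_process (job : List (Int × Int)) (numList : List Int) (pos : Int) : Prop := job = []
instance (job : List (Int × Int)) (numList : List Int) (pos : Int) : Decidable (D_process job numList pos) := by
  unfold D_process; infer_instance

def Spec_process (job : List (Int × Int)) (numList : List Int) (pos : Int) (out : Int) : Prop :=
  ¬ D_process job numList pos → out = process_alt job numList pos
instance (job : List (Int × Int)) (numList : List Int) (pos : Int) (out : Int) : Decidable (Spec_process job numList pos out) := by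
  unfold Spec_process; infer_instance

def pvDiffWitness_process : (List (Int × Int)) × List Int × Int :=
  ([], [0, 0, 0, 0, 0, 0, 0, 0, 0, 0], 0)
def pvDiffWitnessOut_process : Int × Int := (1, 0)

-- ===== CLAIM (what is proved, stated in full; the proofs are below) =====
def Claim_unchanged_process : Prop := ∀ (job : List (Int × Int)) (numList : List Int) (pos : Int), Dom_process job numList pos → Pre_process job numList pos → Spec_process job numList pos (process job numList pos)
def Claim_changed_process : Prop := Dom_process (pvDiffWitness_process.1) (pvDiffWitness_process.2.1) (pvDiffWitness_process.2.2) ∧ Pre_process (pvDiffWitness_process.1) (pvDiffWitness_process.2.1) (pvDiffWitness_process.2.2) ∧ D_process (pvDiffWitness_process.1) (pvDiffWitness_process.2.1) (pvDiffWitness_process.2.2) ∧ process (pvDiffWitness_process.1) (pvDiffWitness_process.2.1) (pvDiffWitness_process.2.2) = pvDiffWitnessOut_process.1 ∧ process_alt (pvDiffWitness_process.1) (pvDiffWitness_process.2.1) (pvDiffWitness_process.2.2) = pvDiffWitnessOut_process.2 ∧ pvDiffWitnessOut_process.1 ≠ pvDiffWitnessOut_process.2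
def Claim_exact_process : Prop := ∀ (job : List (Int × Int)) (numList : List Int) (pos : Int), Dom_process job numList pos → Pre_process job numList pos → D_process job numList pos → process job numList pos ≠ process_alt job numList pos

-- ===== LEMMAS AND PROOFS =====

-- 0-based position of the first id equal to pos (length of the list if absent)
def hit (pos : Int) : List (Int × Int) → Nat
  | [] => 0
  | y :: t => if y.1 = pos then 0 else hit pos t + 1

-- one step of the printer: pop the first job of maximal priority, rotating the prefix before it to the back
def step1 (q : List (Int × Int)) : Option ((Int × Int) × List (Int × Int)) :=
  match PySem.List.max? q (fun y => y.2) with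
  | none => none
  | some xm =>
    match q.dropWhile (fun y => decide (y.2 < xm.2)) with
    | [] => none
    | x :: b => some (x, b ++ q.takeWhile (fun y => decide (y.2 < xm.2)))

def printF : Nat → List (Int × Int) → List (Int × Int)
  | 0, _ => []
  | f + 1, q =>
    match step1 q with
    | none => []
    | some (x, q') => x :: printF f q'

-- the full printing order of queue q
def printOrder (q : List (Int × Int)) : List (Int × Int) := printF q.length q

-- the remaining elements in queue order when the front pointer is at original index c
def cyc (c : Int) (R : List (Int × (Int × Int))) : List (Int × (Int × Int)) :=
  R.filter (fun kj => decide (c ≤ kj.1)) ++ R.filter (fun kj => decide (kj.1 < c))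

-- B's running counter over a printed list
def hitRun (pos : Int) : Int → List (Int × Int) → Int
  | step, [] => step
  | step, y :: t => if y.1 = pos then step + 1 else hitRun pos (step + 1) t


-- ---------- Stage A: A's loop prints in first-max order ----------

lemma pyRange_neg_one_append (a m b : Int) (h1 : b ≤ m) (h2 : m ≤ a) :
    PySem.List.pyRange a b (-1) = PySem.List.pyRange a m (-1) ++ PySem.List.pyRange m b (-1) := by
  rw [PySem.List.pyRange_neg_one_eq_reverse, PySem.List.pyRange_neg_one_eq_reverse,
      PySem.List.pyRange_neg_one_eq_reverse,
      PySem.List.pyRange_one_append (b + 1) (m + 1) (a + 1) (by omega) (by omega),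
      List.reverse_append]

lemma canPrintGo_skip (p : Int) (nl : List Int) (L rest : List Int)
    (h : ∀ j ∈ L, j ≠ p ∧ ¬(PySem.List.pyGetD nl j 0 > 0 ∧ j > p)) :
    canPrintGo p nl (L ++ rest) = canPrintGo p nl rest := by
  induction L with
  | nil => rfl
  | cons j L ih =>
    have hj := h j (by simp)
    simp only [List.cons_append, canPrintGo, if_neg hj.1, if_neg hj.2]
    exact ih (fun x hx => h x (by simp [hx]))

lemma count_high_zero {q : List (Int × Int)} {nl : List Int} (hc : ConsHist nl q)
    {m j : Int} (hmax : ∀ y ∈ q, y.2 ≤ m) (hj : m < j) (hj9 : j ≤ 9) (hj1 : 1 ≤ j) :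
    PySem.List.pyGetD nl j 0 = 0 := by
  have hcj := hc.2 j (by rw [PySem.List.mem_pyRange_one]; omega)
  have hz : q.countP (fun y => y.2 == j) = 0 := by
    rw [List.countP_eq_zero]
    intro y hy
    simp only [beq_iff_eq]
    have := hmax y hy; omega
  rw [hcj, hz]; rfl

lemma canPrint_true {q : List (Int × Int)} {nl : List Int} (x : Int × Int)
    (hc : ConsHist nl q) (hp : PrioOK q) (hx : x ∈ q) (hmax : ∀ y ∈ q, y.2 ≤ x.2) :
    canPrint x nl = (true, PySem.List.pySetD nl x.2 (PySem.List.pyGetD nl x.2 0 - 1)) := by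
  obtain ⟨h1, h9⟩ := hp x hx
  unfold canPrint
  rw [pyRange_neg_one_append 9 x.2 0 (by omega) (by omega), canPrintGo_skip]
  · rw [PySem.List.pyRange_neg_one_cons (by omega)]
    simp [canPrintGo]
  · intro j hj
    rw [PySem.List.mem_pyRange_neg_one] at hj
    refine ⟨by omega, ?_⟩
    rw [count_high_zero hc hmax hj.1 hj.2 (by omega)]
    simp

lemma canPrint_false {q : List (Int × Int)} {nl : List Int} (h y0 : Int × Int)
    (hc : ConsHist nl q) (hp : PrioOK q) (hy : y0 ∈ q) (hlt : h.2 < y0.2) :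
    canPrint h nl = (false, nl) := by
  obtain ⟨xm, hxm⟩ : ∃ xm, PySem.List.max? q (fun y => y.2) = some xm := by
    cases hq : PySem.List.max? q (fun y => y.2) with
    | none =>
      have : q = [] := (PySem.List.max?_eq_none_iff q _).mp hq
      subst this; cases hy
    | some xm => exact ⟨xm, rfl⟩
  have hxmem : xm ∈ q := PySem.List.max?_mem hxm
  have hxmax : ∀ y ∈ q, y.2 ≤ xm.2 := PySem.List.max?_isMax hxm
  obtain ⟨hj1, hj9⟩ := hp xm hxmem
  have hpj : h.2 < xm.2 := lt_of_lt_of_le hlt (hxmax y0 hy)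
  unfold canPrint
  rw [pyRange_neg_one_append 9 xm.2 0 (by omega) (by omega), canPrintGo_skip]
  · rw [PySem.List.pyRange_neg_one_cons (by omega)]
    have hcnt := hc.2 xm.2 (by rw [PySem.List.mem_pyRange_one]; omega)
    have hpos : 0 < q.countP (fun y => y.2 == xm.2) :=
      List.countP_pos_iff.mpr ⟨xm, hxmem, by simp⟩
    simp only [canPrintGo, if_neg (show ¬(xm.2 = h.2) by omega)]
    rw [if_pos]
    constructor
    · rw [hcnt]; exact_mod_cast hpos
    · omega
  · intro j hj
    rw [PySem.List.mem_pyRange_neg_one] at hj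
    refine ⟨by omega, ?_⟩
    rw [count_high_zero hc hxmax hj.1 hj.2 (by omega)]
    simp

lemma consHist_dec {nl : List Int} {a b : List (Int × Int)} (x : Int × Int)
    (hc : ConsHist nl (a ++ x :: b)) (h1 : 1 ≤ x.2) (h9 : x.2 ≤ 9) :
    ConsHist (PySem.List.pySetD nl x.2 (PySem.List.pyGetD nl x.2 0 - 1)) (b ++ a) := by
  obtain ⟨hlen, hcnt⟩ := hc
  have hset : PySem.List.pySetD nl x.2 (PySem.List.pyGetD nl x.2 0 - 1)
      = nl.set x.2.toNat (PySem.List.pyGetD nl x.2 0 - 1) :=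
    PySem.List.pySetD_of_nonneg nl _ (by omega)
  refine ⟨by rw [hset]; simp [hlen], ?_⟩
  intro j hj
  have hj' : 1 ≤ j ∧ j < 10 := by
    rw [PySem.List.mem_pyRange_one] at hj; omega
  have hcj := hcnt j hj
  have hgx : PySem.List.pyGetD nl x.2 0 = nl[x.2.toNat]'(by simp [hlen]; omega) :=
    PySem.List.pyGetD_eq_getElem nl 0 (by omega) (by simp [hlen]; omega)
  have hgj2 : PySem.List.pyGetD (nl.set x.2.toNat (PySem.List.pyGetD nl x.2 0 - 1)) j 0
      = (nl.set x.2.toNat (PySem.List.pyGetD nl x.2 0 - 1))[j.toNat]'(by simp [hlen]; omega) :=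
    PySem.List.pyGetD_eq_getElem _ 0 (by omega) (by simp [hlen]; omega)
  have hgjnl : PySem.List.pyGetD nl j 0 = nl[j.toNat]'(by simp [hlen]; omega) :=
    PySem.List.pyGetD_eq_getElem nl 0 (by omega) (by simp [hlen]; omega)
  rw [hgjnl] at hcj
  rw [hset, hgj2, List.getElem_set]
  have hcnt2 : (b ++ a).countP (fun z => z.2 == j)
      = b.countP (fun z => z.2 == j) + a.countP (fun z => z.2 == j) :=
    List.countP_append
  by_cases hxj' : x.2 = j
  · have hxj : x.2.toNat = j.toNat := by omega
    rw [if_pos hxj, hgx]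
    simp only [hxj]
    have hcntq : (a ++ x :: b).countP (fun z => z.2 == j)
        = a.countP (fun z => z.2 == j) + b.countP (fun z => z.2 == j) + 1 := by
      rw [List.countP_append, List.countP_cons]
      simp [hxj']
      omega
    omega
  · have hxj : ¬ (x.2.toNat = j.toNat) := by omega
    rw [if_neg hxj]
    have hcntq : (a ++ x :: b).countP (fun z => z.2 == j)
        = a.countP (fun z => z.2 == j) + b.countP (fun z => z.2 == j) := by
      rw [List.countP_append, List.countP_cons]
      simp [hxj']
    omega

lemma prioOK_perm {q q' : List (Int × Int)} (h : ∀ y ∈ q', y ∈ q) (hp : PrioOK q) : PrioOK q' :=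
  fun y hy => hp y (h y hy)

lemma rot (pos N : Int) :
    ∀ (a : List (Int × Int)) (x : Int × Int) (b : List (Int × Int)) (nl : List Int)
      (cur : Int) (fuel : Nat),
    ConsHist nl (a ++ x :: b) → PrioOK (a ++ x :: b) →
    (∀ y ∈ a ++ x :: b, y.2 ≤ x.2) → (∀ y ∈ a, y.2 < x.2) → cur < N →
    processLoop pos N (a.length + 1 + fuel) (a ++ x :: b) nl cur
      = if x.1 = pos then cur
        else processLoop pos N fuel (b ++ a)
          (PySem.List.pySetD nl x.2 (PySem.List.pyGetD nl x.2 0 - 1)) (cur + 1) := by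
  intro a
  induction a with
  | nil =>
    intro x b nl cur fuel hc hp hmax _ hcur
    simp only [List.nil_append, List.length_nil]
    have hcp := canPrint_true x hc hp (by simp) hmax
    simp only [show 0 + 1 + fuel = fuel + 1 from by omega, processLoop, if_pos hcur, hcp]
    simp
  | cons h a ih =>
    intro x b nl cur fuel hc hp hmax hlt hcur
    have hcp : canPrint h nl = (false, nl) :=
      canPrint_false h x hc hp (by simp) (hlt h (by simp))
    have hshape : (h :: a).length + 1 + fuel = (a.length + 1 + fuel) + 1 := by
      simp [List.length_cons]; omega
    rw [hshape]
    simp only [processLoop, if_pos hcur, List.cons_append, hcp]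
    have hre : (a ++ x :: b) ++ [h] = a ++ x :: (b ++ [h]) := by simp
    rw [hre, ih x (b ++ [h]) nl cur fuel]
    · rw [List.append_assoc, List.singleton_append, if_neg Bool.false_ne_true]
    · constructor
      · exact hc.1
      · intro j hj
        rw [hc.2 j hj]
        congr 1
        have hperm : (a ++ x :: (b ++ [h])).Perm (h :: (a ++ x :: b)) := by
          have he : a ++ x :: (b ++ [h]) = (a ++ x :: b) ++ [h] := by simp
          rw [he]
          exact List.perm_append_singleton _ _
        exact (hperm.countP_eq _).symm
    · exact prioOK_perm (by intro y hy; simp at hy ⊢; tauto) hp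
    · intro y hy; apply hmax; simp at hy ⊢; tauto
    · intro y hy; exact hlt y (by simp [hy])
    · exact hcur

lemma step1_some {q : List (Int × Int)} {x : Int × Int} {q' : List (Int × Int)}
    (h : step1 q = some (x, q')) :
    ∃ a b, q = a ++ x :: b ∧ q' = b ++ a ∧
      (∀ y ∈ q, y.2 ≤ x.2) ∧ (∀ y ∈ a, y.2 < x.2) := by
  unfold step1 at h
  split at h
  · cases h
  · rename_i xm hm
    split at h
    · cases h
    · rename_i x0 b hd
      have hinj : x0 = x ∧ b ++ q.takeWhile (fun y => decide (y.2 < xm.2)) = q' := by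
        simpa using h
      obtain ⟨hx0, hq'⟩ := hinj
      have hxmax := PySem.List.max?_isMax hm
      have hne : q.dropWhile (fun y => decide (y.2 < xm.2)) ≠ [] := by
        rw [hd]; simp
      have hnot : ¬ (x0.2 < xm.2) := by
        have h5 := List.head_dropWhile_not (l := q) (p := fun y => decide (y.2 < xm.2)) hne
        have hhead : (q.dropWhile (fun y => decide (y.2 < xm.2))).head hne = x0 := by
          simp [hd]
        rw [hhead] at h5
        simpa using h5
      have hmem : x0 ∈ q := (List.dropWhile_sublist (p := fun y => decide (y.2 < xm.2))
        (l := q)).subset (by rw [hd]; simp)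
      have hx2 : x0.2 = xm.2 := by
        have := hxmax x0 hmem
        omega
      subst hx0
      refine ⟨q.takeWhile (fun y => decide (y.2 < xm.2)), b, ?_, hq'.symm, ?_, ?_⟩
      · conv_lhs => rw [← List.takeWhile_append_dropWhile
          (p := fun y => decide (y.2 < xm.2)) (l := q)]
        rw [hd]
      · intro y hy
        have := hxmax y hy
        omega
      · intro y hy
        have := List.mem_takeWhile_imp hy
        simp at this
        omega

lemma step1_none {q : List (Int × Int)} : step1 q = none ↔ q = [] := by
  constructor
  · intro h
    unfold step1 at h
    split at h
    · rename_i hm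
      exact (PySem.List.max?_eq_none_iff q _).mp hm
    · rename_i xm hm
      split at h
      · rename_i hd
        exfalso
        have hxmem := PySem.List.max?_mem hm
        have : ∀ a ∈ q, (fun y => decide (y.2 < xm.2)) a = true :=
          List.dropWhile_eq_nil_iff.mp hd
        have := this xm hxmem
        simp at this
      · cases h
  · intro h; subst h; rfl

lemma step1_length {q : List (Int × Int)} {x : Int × Int} {q' : List (Int × Int)}
    (h : step1 q = some (x, q')) : q'.length + 1 = q.length := by
  obtain ⟨a, b, hq, hq', _, _⟩ := step1_some h
  subst hq hq'
  simp
  omega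

lemma printOrder_cons {q : List (Int × Int)} {x : Int × Int} {q' : List (Int × Int)}
    (h : step1 q = some (x, q')) : printOrder q = x :: printOrder q' := by
  have hl := step1_length h
  unfold printOrder
  rw [← hl]
  simp [printF, h]

lemma mainA (pos N : Int) :
    ∀ n : Nat, ∀ fuel : Nat, ∀ (q : List (Int × Int)) (nl : List Int) (cur : Int),
    q.length = n → n * n ≤ fuel → ConsHist nl q → PrioOK q → cur + (n : Int) = N + 1 →
    processLoop pos N fuel q nl cur
      = cur + ((min (hit pos (printOrder q)) (n - 1) : Nat) : Int) := by
  intro n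
  induction n using Nat.strong_induction_on with
  | _ n ih =>
    intro fuel q nl cur hlen hfuel hc hp hcur
    by_cases hlt : cur < N
    · have hn2 : 2 ≤ n := by omega
      cases hstep : step1 q with
      | none =>
        exfalso
        have := step1_none.mp hstep
        subst this
        simp at hlen
        omega
      | some r =>
        obtain ⟨x, q'⟩ := r
        obtain ⟨a, b, hq, hq', hmax, hlta⟩ := step1_some hstep
        have hlq' : q'.length + 1 = n := by rw [← hlen]; exact step1_length hstep
        have hlab : a.length + 1 ≤ n := by
          rw [← hlen, hq]; simp
        have hfa : a.length + 1 ≤ fuel := by nlinarith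
        have hfuel2 : a.length + 1 + (fuel - (a.length + 1)) = fuel := by omega
        have hrot := rot pos N a x b nl cur (fuel - (a.length + 1)) (hq ▸ hc) (hq ▸ hp)
          (by rw [← hq]; exact hmax) hlta hlt
        rw [hfuel2] at hrot
        have hstart : processLoop pos N fuel q nl cur
            = if x.1 = pos then cur
              else processLoop pos N (fuel - (a.length + 1)) q'
                (PySem.List.pySetD nl x.2 (PySem.List.pyGetD nl x.2 0 - 1)) (cur + 1) := by
          rw [hq, hrot, ← hq']
        rw [hstart, printOrder_cons hstep]
        by_cases hx : x.1 = pos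
        · rw [if_pos hx]
          simp [hit, hx]
        · rw [if_neg hx]
          obtain ⟨hp1, hp9⟩ := (hq ▸ hp) x (by simp)
          have hfb : (n - 1) * (n - 1) + (a.length + 1) ≤ fuel := by
            obtain ⟨m, rfl⟩ : ∃ m, n = m + 2 := ⟨n - 2, by omega⟩
            have h2 : (m + 1) * (m + 1) + (a.length + 1) ≤ (m + 2) * (m + 2) := by nlinarith
            have h3 : m + 2 - 1 = m + 1 := by omega
            rw [h3]
            linarith
          have hrec := ih (n - 1) (by omega) (fuel - (a.length + 1)) q'
            (PySem.List.pySetD nl x.2 (PySem.List.pyGetD nl x.2 0 - 1)) (cur + 1)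
            (by omega)
            (by omega)
            (by rw [hq']; exact consHist_dec x (hq ▸ hc) hp1 hp9)
            (by
              rw [hq']
              apply prioOK_perm _ (hq ▸ hp)
              intro y hy; simp at hy ⊢; tauto)
            (by push_cast; omega)
          rw [hrec]
          simp only [hit, if_neg hx]
          have harith : min (hit pos (printOrder q') + 1) (n - 1)
              = min (hit pos (printOrder q')) (n - 1 - 1) + 1 := by omega
          rw [harith]
          push_cast
          ring
    · -- loop not entered: n ≤ 1, printOrder contributes nothing
      have hn1 : n ≤ 1 := by omega
      have hres : processLoop pos N fuel q nl cur = cur := by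
        cases fuel with
        | zero => rfl
        | succ f => simp [processLoop, hlt]
      rw [hres]
      have : min (hit pos (printOrder q)) (n - 1) = 0 := by omega
      rw [this]
      simp

lemma processA (job : List (Int × Int)) (nl : List Int) (pos : Int)
    (hc : ConsHist nl job) (hp : PrioOK job) :
    process job nl pos
      = 1 + ((min (hit pos (printOrder job)) (job.length - 1) : Nat) : Int) := by
  unfold process
  rw [PySem.List.len_eq]
  exact mainA pos job.length job.length ((job.length + 1) * (job.length + 1)) job nl 1
    rfl (by nlinarith) hc hp (by omega)



-- ---------- Stage B: the counting pass follows the same print order ----------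

lemma altScan_inl (pos : Int) :
    ∀ (l : List (Int × (Int × Int))) (step s : Int) (P : List (Int × Int)),
    altScan pos l step = .inl s → hitRun pos step (l.map Prod.snd ++ P) = s := by
  intro l
  induction l with
  | nil => intro step s P h; cases h
  | cons kj rest ih =>
    intro step s P h
    simp only [altScan] at h
    simp only [List.map_cons, List.cons_append, hitRun]
    by_cases hx : kj.2.1 = pos
    · rw [if_pos hx] at h ⊢
      cases h; rfl
    · rw [if_neg hx] at h ⊢
      exact ih _ _ _ h

lemma altScan_inr (pos : Int) :
    ∀ (l : List (Int × (Int × Int))) (step s' : Int),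
    altScan pos l step = .inr s' → ∀ P, hitRun pos step (l.map Prod.snd ++ P) = hitRun pos s' P := by
  intro l
  induction l with
  | nil =>
    intro step s' h P
    simp only [altScan] at h
    cases h; rfl
  | cons kj rest ih =>
    intro step s' h P
    simp only [altScan] at h
    by_cases hx : kj.2.1 = pos
    · rw [if_pos hx] at h; cases h
    · rw [if_neg hx] at h
      simp only [List.map_cons, List.cons_append, hitRun, if_neg hx]
      exact ih _ _ h P

-- B3: sorted-list filter split at a threshold

lemma sorted_filter_split {α : Type} (k : α → Int) (t : Int) :
    ∀ l : List α, l.Pairwise (fun u v => k u < k v) →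
    l = l.filter (fun y => decide (k y < t)) ++ l.filter (fun y => decide (t ≤ k y)) := by
  intro l
  induction l with
  | nil => intro _; rfl
  | cons y l ih =>
    intro hp
    have hpl := List.Pairwise.of_cons hp
    have hrel : ∀ z ∈ l, k y < k z := fun z hz => List.rel_of_pairwise_cons hp hz
    by_cases hy : k y < t
    · simp only [List.filter_cons, decide_eq_true_eq, if_pos hy,
        if_neg (show ¬ (t ≤ k y) by omega)]
      rw [List.cons_append, ← ih hpl]
    · have h1 : l.filter (fun y => decide (k y < t)) = [] := by
        rw [List.filter_eq_nil_iff]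
        intro z hz
        have := hrel z hz
        simp only [decide_eq_true_eq]
        omega
      have h2 : l.filter (fun y => decide (t ≤ k y)) = l := by
        rw [List.filter_eq_self]
        intro z hz
        have := hrel z hz
        simp only [decide_eq_true_eq]
        omega
      simp only [List.filter_cons, decide_eq_true_eq, if_neg hy,
        if_pos (show t ≤ k y by omega), h1, h2, List.nil_append]

lemma sorted_split_elem {α : Type} (k : α → Int) {l a b : List α} {x : α}
    (h : l = a ++ x :: b) (hp : l.Pairwise (fun u v => k u < k v)) :
    a = l.filter (fun y => decide (k y < k x)) ∧ b = l.filter (fun y => decide (k x < k y)) := by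
  subst h
  rw [List.pairwise_append] at hp
  obtain ⟨hpa, hpxb, hcross⟩ := hp
  have hxb : ∀ z ∈ b, k x < k z := fun z hz => List.rel_of_pairwise_cons hpxb hz
  have hax : ∀ y ∈ a, k y < k x := fun y hy => hcross y hy x (by simp)
  constructor
  · rw [List.filter_append, List.filter_cons]
    rw [List.filter_eq_self.mpr (by intro z hz; simpa using hax z hz)]
    rw [if_neg (by simp)]
    rw [List.filter_eq_nil_iff.mpr (by intro z hz; have := hxb z hz; simp; omega)]
    simp
  · rw [List.filter_append, List.filter_cons]
    rw [List.filter_eq_nil_iff.mpr (by intro z hz; have := hax z hz; simp; omega)]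
    rw [if_neg (by simp)]
    rw [List.filter_eq_self.mpr (by intro z hz; simpa using hxb z hz)]
    simp

lemma step1_shape {a : List (Int × Int)} {x0 : Int × Int} {r : List (Int × Int)} (m : Int)
    (hx0 : x0.2 = m) (ha : ∀ y ∈ a, y.2 < m) (hball : ∀ y ∈ a ++ x0 :: r, y.2 ≤ m) :
    step1 (a ++ x0 :: r) = some (x0, r ++ a) := by
  obtain ⟨xm, hm⟩ : ∃ xm, PySem.List.max? (a ++ x0 :: r) (fun y => y.2) = some xm := by
    cases hq : PySem.List.max? (a ++ x0 :: r) (fun y => y.2) with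
    | none =>
      have := (PySem.List.max?_eq_none_iff _ _).mp hq
      simp at this
    | some xm => exact ⟨xm, rfl⟩
  have hxm2 : xm.2 = m := by
    have h1 : xm.2 ≤ m := hball xm (PySem.List.max?_mem hm)
    have h2 : x0.2 ≤ xm.2 := PySem.List.max?_isMax hm x0 (by simp)
    omega
  have hdw : (a ++ x0 :: r).dropWhile (fun y => decide (y.2 < m)) = x0 :: r := by
    rw [List.dropWhile_append_of_pos (by intro y hy; simpa using ha y hy),
        List.dropWhile_cons_of_neg (by simp; omega)]
  have htw : (a ++ x0 :: r).takeWhile (fun y => decide (y.2 < m)) = a := by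
    rw [List.takeWhile_append_of_pos (by intro y hy; simpa using ha y hy),
        List.takeWhile_cons_of_neg (by simp; omega)]
    simp
  simp only [step1, hm, hxm2, hdw, htw]

-- B2: one priority level is printed in queue order, then the queue restarts after its last element

lemma printOrder_level (m : Int) :
    ∀ (w : List (Int × Int)) (x : Int × Int) (u : List (Int × Int)),
    x.2 = m → (∀ y ∈ u, y.2 ≠ m) → (∀ y ∈ w ++ x :: u, y.2 ≤ m) →
    printOrder (w ++ x :: u)
      = (w ++ x :: u).filter (fun y => y.2 == m)
        ++ printOrder (u ++ w.filter (fun y => !(y.2 == m))) := by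
  suffices H : ∀ (n : Nat) (w : List (Int × Int)) (x : Int × Int) (u : List (Int × Int)),
      w.length = n → x.2 = m → (∀ y ∈ u, y.2 ≠ m) → (∀ y ∈ w ++ x :: u, y.2 ≤ m) →
      printOrder (w ++ x :: u)
        = (w ++ x :: u).filter (fun y => y.2 == m)
          ++ printOrder (u ++ w.filter (fun y => !(y.2 == m))) by
    intro w x u hx hu hball
    exact H w.length w x u rfl hx hu hball
  intro n
  induction n using Nat.strong_induction_on with
  | _ n ih =>
    intro w x u hwlen hx hu hball
    by_cases hwf : w.filter (fun y => y.2 == m) = []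
    · have hwall : ∀ y ∈ w, y.2 < m := by
        intro y hy
        have h1 := hball y (by simp [hy])
        have h2 := List.filter_eq_nil_iff.mp hwf y hy
        simp at h2
        omega
      have hs := step1_shape m hx hwall hball
      rw [printOrder_cons hs]
      have hfu : u.filter (fun y => y.2 == m) = [] :=
        List.filter_eq_nil_iff.mpr (by intro y hy; simpa using hu y hy)
      have hfq : (w ++ x :: u).filter (fun y => y.2 == m) = [x] := by
        rw [List.filter_append, hwf, List.filter_cons, if_pos (by simp [hx]), hfu]
        simp
      have hfw : w.filter (fun y => !(y.2 == m)) = w :=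
        List.filter_eq_self.mpr (by intro y hy; have := hwall y hy; simp; omega)
      rw [hfq, hfw]
      simp
    · have hdwne : w.dropWhile (fun y => decide (y.2 < m)) ≠ [] := by
        intro hdw
        apply hwf
        apply List.filter_eq_nil_iff.mpr
        intro y hy
        have := List.dropWhile_eq_nil_iff.mp hdw y hy
        simp at this ⊢
        omega
      obtain ⟨x0, w', hsplit⟩ : ∃ x0 w', w.dropWhile (fun y => decide (y.2 < m)) = x0 :: w' := by
        cases hd : w.dropWhile (fun y => decide (y.2 < m)) with
        | nil => exact absurd hd hdwne
        | cons x0 w' => exact ⟨x0, w', rfl⟩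
      have hw_eq : w = w.takeWhile (fun y => decide (y.2 < m)) ++ x0 :: w' := by
        conv_lhs => rw [← List.takeWhile_append_dropWhile
          (p := fun y => decide (y.2 < m)) (l := w)]
        rw [hsplit]
      have ha : ∀ y ∈ w.takeWhile (fun y => decide (y.2 < m)), y.2 < m := by
        intro y hy
        have := List.mem_takeWhile_imp hy
        simpa using this
      have hx0 : x0.2 = m := by
        have hnot : ¬ (x0.2 < m) := by
          have h5 := List.head_dropWhile_not (l := w) (p := fun y => decide (y.2 < m)) hdwne
          have hhead : (w.dropWhile (fun y => decide (y.2 < m))).head hdwne = x0 := by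
            simp [hsplit]
          rw [hhead] at h5
          simpa using h5
        have hle : x0.2 ≤ m := by
          apply hball
          rw [hw_eq]
          simp
        omega
      have hq : w ++ x :: u
          = w.takeWhile (fun y => decide (y.2 < m)) ++ x0 :: (w' ++ x :: u) := by
        conv_lhs => rw [hw_eq]
        simp
      have hs := step1_shape m hx0 ha (by rw [← hq]; exact hball)
      rw [hq, printOrder_cons hs]
      have hassoc : (w' ++ x :: u) ++ w.takeWhile (fun y => decide (y.2 < m))
          = w' ++ x :: (u ++ w.takeWhile (fun y => decide (y.2 < m))) := by simp
      rw [hassoc]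
      have hlen' : w'.length < n := by
        have hlw : w.length
            = (w.takeWhile (fun y => decide (y.2 < m))).length + (x0 :: w').length := by
          conv_lhs => rw [hw_eq]
          rw [List.length_append]
        simp at hlw
        omega
      have hih := ih w'.length hlen' w' x (u ++ w.takeWhile (fun y => decide (y.2 < m))) rfl hx
        (by
          intro y hy
          rcases List.mem_append.mp hy with h | h
          · exact hu y h
          · have := ha y h; omega)
        (by
          intro y hy
          apply hball
          rw [hq]
          simp at hy ⊢
          tauto)
      rw [hih]
      have hfu : u.filter (fun y => y.2 == m) = [] :=
        List.filter_eq_nil_iff.mpr (by intro y hy; simpa using hu y hy)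
      have hfa : (w.takeWhile (fun y => decide (y.2 < m))).filter (fun y => y.2 == m) = [] :=
        List.filter_eq_nil_iff.mpr (by intro y hy; have := ha y hy; simp; omega)
      have hfa2 : (w.takeWhile (fun y => decide (y.2 < m))).filter (fun y => !(y.2 == m))
          = w.takeWhile (fun y => decide (y.2 < m)) :=
        List.filter_eq_self.mpr (by intro y hy; have := ha y hy; simp; omega)
      have hfw : w.filter (fun y => !(y.2 == m))
          = w.takeWhile (fun y => decide (y.2 < m)) ++ w'.filter (fun y => !(y.2 == m)) := by
        conv_lhs => rw [hw_eq]
        rw [List.filter_append, List.filter_cons,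
          if_neg (show ¬ ((!(x0.2 == m)) = true) by simp [hx0]), hfa2]
      rw [hfw]
      simp only [List.filter_append, List.filter_cons, hfu, hfa,
        if_pos (show (x.2 == m) = true by simp [hx]),
        if_pos (show (x0.2 == m) = true by simp [hx0])]
      simp [List.append_assoc]
-- split a list at the LAST element satisfying p

lemma last_filter_split {α : Type} (p : α → Bool) :
    ∀ (l : List α), l.filter p ≠ [] →
    ∃ x w u, l = w ++ x :: u ∧ p x = true ∧ u.filter p = [] ∧ (l.filter p).getLast? = some x := by
  intro l
  induction l with
  | nil => intro h; simp at h
  | cons y t ih =>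
    intro h
    by_cases htf : t.filter p = []
    · have hpy : p y = true := by
        by_contra hpy
        apply h
        rw [List.filter_cons, if_neg hpy, htf]
      refine ⟨y, [], t, by simp, hpy, htf, ?_⟩
      rw [List.filter_cons, if_pos hpy, htf]
      rfl
    · obtain ⟨x, w, u, ht, hpx, hu, hlast⟩ := ih htf
      refine ⟨x, y :: w, u, by simp [ht], hpx, hu, ?_⟩
      rw [List.filter_cons]
      by_cases hpy : p y = true
      · rw [if_pos hpy]
        cases hx : t.filter p with
        | nil => exact absurd hx htf
        | cons a b =>
          rw [hx] at hlast
          rw [List.getLast?_cons_cons, hlast]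
      · rw [if_neg hpy]; exact hlast

lemma key_unique {α : Type} (k : α → Int) :
    ∀ {l : List α}, l.Pairwise (fun u v => k u < k v) →
    ∀ {y z : α}, y ∈ l → z ∈ l → k y = k z → y = z := by
  intro l
  induction l with
  | nil => intro _ y z hy; simp at hy
  | cons a t ih =>
    intro hp y z hy hz he
    have hrel : ∀ w ∈ t, k a < k w := fun w hw => List.rel_of_pairwise_cons hp hw
    rcases List.mem_cons.mp hy with rfl | hy' <;> rcases List.mem_cons.mp hz with rfl | hz'
    · rfl
    · have := hrel z hz'; omega
    · have := hrel y hy'; omega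
    · exact ih (List.Pairwise.of_cons hp) hy' hz' he

lemma cyc_step {R : List (Int × (Int × Int))} (q : Int)
    (hRp : R.Pairwise (fun u v => u.1 < v.1))
    (n c : Int) (hc0 : 0 ≤ c) (hcn : c < n)
    (hRb : ∀ kj ∈ R, 0 ≤ kj.1 ∧ kj.1 < n)
    {X : Int × (Int × Int)} {W U : List (Int × (Int × Int))}
    (hCW : cyc c R = W ++ X :: U)
    (hXq : (X.2.2 == q) = true)
    (hUq : U.filter (fun kj => kj.2.2 == q) = [])
    : U ++ W.filter (fun kj => !(kj.2.2 == q))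
      = cyc (PySem.Int.mod (X.1 + 1) n) (R.filter (fun kj => !(kj.2.2 == q))) := by
  set P0 : Int × (Int × Int) → Bool := fun kj => !(kj.2.2 == q) with hP0
  set R'' := R.filter P0 with hR''
  have hsubR'' : ∀ kj ∈ R'', kj ∈ R := fun kj hkj => (List.mem_filter.mp hkj).1
  have hR''p : R''.Pairwise (fun u v => u.1 < v.1) :=
    List.Pairwise.sublist List.filter_sublist hRp
  have hXC : X ∈ cyc c R := by rw [hCW]; simp
  have hXR : X ∈ R := by
    unfold cyc at hXC
    rcases List.mem_append.mp hXC with h | h <;> exact (List.mem_filter.mp h).1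
  have hXb := hRb X hXR
  have hXne : ∀ kj ∈ R'', ¬ (kj.1 = X.1) := by
    intro kj hkj he
    have heq : kj = X := key_unique Prod.fst hRp (hsubR'' kj hkj) hXR he
    have h2 := (List.mem_filter.mp hkj).2
    rw [heq] at h2
    simp [hP0, hXq] at h2
  have hswap : ∀ (p r : Int × (Int × Int) → Bool) (l : List (Int × (Int × Int))),
      (l.filter p).filter r = (l.filter r).filter p := by
    intro p r l
    rw [List.filter_filter, List.filter_filter]
    exact List.filter_congr (fun x _ => Bool.and_comm _ _)
  have hUnoq : ∀ kj ∈ U, P0 kj = true := by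
    intro kj hkj
    have := List.filter_eq_nil_iff.mp hUq kj hkj
    simp [hP0]
    simpa using this
  have hcases : (∃ lw, W = R.filter (fun kj => decide (c ≤ kj.1)) ++ lw
        ∧ R.filter (fun kj => decide (kj.1 < c)) = lw ++ X :: U)
      ∨ (∃ t, R.filter (fun kj => decide (c ≤ kj.1)) = W ++ X :: t
        ∧ U = t ++ R.filter (fun kj => decide (kj.1 < c))) := by
    have h0 : R.filter (fun kj => decide (c ≤ kj.1)) ++ R.filter (fun kj => decide (kj.1 < c))
        = W ++ X :: U := hCW
    rcases List.append_eq_append_iff.mp h0 with ⟨a', h1, h2⟩ | ⟨a', h1, h2⟩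
    · exact Or.inl ⟨a', h1, h2⟩
    · cases a' with
      | nil =>
        left
        refine ⟨[], by simpa using h1.symm, ?_⟩
        simp at h2
        simp [← h2]
      | cons z t =>
        right
        have hz : X = z ∧ U = t ++ R.filter (fun kj => decide (kj.1 < c)) := by
          have := h2
          simp at this
          exact ⟨this.1, this.2⟩
        obtain ⟨rfl, hU2⟩ := hz
        exact ⟨t, h1, hU2⟩
  rcases hcases with ⟨lw, hW, hRlo⟩ | ⟨t, hA, hU2⟩
  · -- the last printed element of the level lies in the wrapped-around part
    obtain ⟨hlw, hU⟩ := sorted_split_elem Prod.fst hRlo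
      (List.Pairwise.sublist List.filter_sublist hRp)
    have hXlo : X ∈ R.filter (fun kj => decide (kj.1 < c)) := by rw [hRlo]; simp
    have hXc : X.1 < c := by
      have := (List.mem_filter.mp hXlo).2
      simpa using this
    have hmod : PySem.Int.mod (X.1 + 1) n = X.1 + 1 := by
      rw [PySem.Int.mod_eq_emod_of_pos (by omega)]
      exact Int.emod_eq_of_lt (by omega) (by omega)
    rw [hmod]
    have hUr : U = (R''.filter (fun kj => decide (kj.1 < c))).filter
        (fun y => decide (X.1 < y.1)) := by
      calc U = U.filter P0 := (List.filter_eq_self.mpr hUnoq).symm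
        _ = ((R.filter (fun kj => decide (kj.1 < c))).filter
              (fun y => decide (X.1 < y.1))).filter P0 := by rw [← hU]
        _ = ((R.filter (fun kj => decide (kj.1 < c))).filter P0).filter
              (fun y => decide (X.1 < y.1)) := hswap _ _ _
        _ = ((R.filter P0).filter (fun kj => decide (kj.1 < c))).filter
              (fun y => decide (X.1 < y.1)) := by rw [hswap (fun kj => decide (kj.1 < c)) P0]
    have hhir : (R.filter (fun kj => decide (c ≤ kj.1))).filter P0
        = R''.filter (fun kj => decide (c ≤ kj.1)) := by
      rw [hswap, hR'']
    have hlwr : lw.filter P0 = (R''.filter (fun kj => decide (kj.1 < c))).filter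
        (fun y => decide (y.1 < X.1)) := by
      calc lw.filter P0
          = ((R.filter (fun kj => decide (kj.1 < c))).filter
              (fun y => decide (y.1 < X.1))).filter P0 := by rw [← hlw]
        _ = ((R.filter (fun kj => decide (kj.1 < c))).filter P0).filter
              (fun y => decide (y.1 < X.1)) := hswap _ _ _
        _ = ((R.filter P0).filter (fun kj => decide (kj.1 < c))).filter
              (fun y => decide (y.1 < X.1)) := by rw [hswap (fun kj => decide (kj.1 < c)) P0]
    have e_hi : R''.filter (fun kj => decide (X.1 + 1 ≤ kj.1))
        = (R''.filter (fun kj => decide (kj.1 < c))).filter (fun y => decide (X.1 < y.1))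
          ++ R''.filter (fun kj => decide (c ≤ kj.1)) := by
      have hs := sorted_filter_split Prod.fst c
        (R''.filter (fun kj => decide (X.1 + 1 ≤ kj.1)))
        (List.Pairwise.sublist List.filter_sublist hR''p)
      rw [hs]
      congr 1
      · rw [hswap]
        apply List.filter_congr
        intro kj _
        rw [Bool.eq_iff_iff]
        simp only [decide_eq_true_eq]
        omega
      · rw [hswap]
        apply List.filter_eq_self.mpr
        intro kj hkj
        have := (List.mem_filter.mp hkj).2
        simp only [decide_eq_true_eq] at this ⊢
        omega
    have e_lo : R''.filter (fun kj => decide (kj.1 < X.1 + 1))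
        = (R''.filter (fun kj => decide (kj.1 < c))).filter (fun y => decide (y.1 < X.1)) := by
      have h1 : (R''.filter (fun kj => decide (kj.1 < c))).filter (fun y => decide (y.1 < X.1))
          = (R''.filter (fun y => decide (y.1 < X.1))).filter (fun kj => decide (kj.1 < c)) :=
        hswap _ _ _
      have h2 : (R''.filter (fun y => decide (y.1 < X.1))).filter (fun kj => decide (kj.1 < c))
          = R''.filter (fun y => decide (y.1 < X.1)) := by
        apply List.filter_eq_self.mpr
        intro kj hkj
        have := (List.mem_filter.mp hkj).2
        simp only [decide_eq_true_eq] at this ⊢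
        omega
      rw [h1, h2]
      apply List.filter_congr
      intro kj hkj
      have hne := hXne kj hkj
      rw [Bool.eq_iff_iff]
      simp only [decide_eq_true_eq]
      omega
    rw [hW, List.filter_append, hUr, hhir, hlwr]
    unfold cyc
    rw [e_hi, e_lo, List.append_assoc]
  · -- the last printed element of the level lies at or after the pointer
    obtain ⟨hWf, htf⟩ := sorted_split_elem Prod.fst hA
      (List.Pairwise.sublist List.filter_sublist hRp)
    have hXhi : X ∈ R.filter (fun kj => decide (c ≤ kj.1)) := by rw [hA]; simp
    have hXc : c ≤ X.1 := by
      have := (List.mem_filter.mp hXhi).2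
      simpa using this
    have htnoq : ∀ kj ∈ t, P0 kj = true := fun kj hkj => hUnoq kj (by rw [hU2]; simp [hkj])
    have hlonoq : ∀ kj ∈ R.filter (fun kj => decide (kj.1 < c)), P0 kj = true :=
      fun kj hkj => hUnoq kj (by rw [hU2]; simp [hkj])
    have htr : t = R''.filter (fun y => decide (X.1 < y.1)) := by
      have h1 : t = (R''.filter (fun kj => decide (c ≤ kj.1))).filter
          (fun y => decide (X.1 < y.1)) := by
        calc t = t.filter P0 := (List.filter_eq_self.mpr htnoq).symm
          _ = ((R.filter (fun kj => decide (c ≤ kj.1))).filter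
                (fun y => decide (X.1 < y.1))).filter P0 := by rw [← htf]
          _ = ((R.filter (fun kj => decide (c ≤ kj.1))).filter P0).filter
                (fun y => decide (X.1 < y.1)) := hswap _ _ _
          _ = ((R.filter P0).filter (fun kj => decide (c ≤ kj.1))).filter
                (fun y => decide (X.1 < y.1)) := by rw [hswap (fun kj => decide (c ≤ kj.1)) P0]
      rw [h1, hswap]
      apply List.filter_eq_self.mpr
      intro kj hkj
      have := (List.mem_filter.mp hkj).2
      simp only [decide_eq_true_eq] at this ⊢
      omega
    have hlor : R.filter (fun kj => decide (kj.1 < c))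
        = R''.filter (fun kj => decide (kj.1 < c)) := by
      calc R.filter (fun kj => decide (kj.1 < c))
          = (R.filter (fun kj => decide (kj.1 < c))).filter P0 :=
            (List.filter_eq_self.mpr hlonoq).symm
        _ = (R.filter P0).filter (fun kj => decide (kj.1 < c)) :=
            hswap (fun kj => decide (kj.1 < c)) P0 R
    have hWr : W.filter P0 = (R''.filter (fun kj => decide (c ≤ kj.1))).filter
        (fun y => decide (y.1 < X.1)) := by
      calc W.filter P0
          = ((R.filter (fun kj => decide (c ≤ kj.1))).filter
              (fun y => decide (y.1 < X.1))).filter P0 := by rw [← hWf]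
        _ = ((R.filter (fun kj => decide (c ≤ kj.1))).filter P0).filter
              (fun y => decide (y.1 < X.1)) := hswap _ _ _
        _ = ((R.filter P0).filter (fun kj => decide (c ≤ kj.1))).filter
              (fun y => decide (y.1 < X.1)) := by rw [hswap (fun kj => decide (c ≤ kj.1)) P0]
    by_cases hX1 : X.1 + 1 < n
    · have hmod : PySem.Int.mod (X.1 + 1) n = X.1 + 1 := by
        rw [PySem.Int.mod_eq_emod_of_pos (by omega)]
        exact Int.emod_eq_of_lt (by omega) (by omega)
      rw [hmod]
      have e_hi : R''.filter (fun kj => decide (X.1 + 1 ≤ kj.1))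
          = R''.filter (fun y => decide (X.1 < y.1)) := by
        apply List.filter_congr
        intro kj _
        rw [Bool.eq_iff_iff]
        simp only [decide_eq_true_eq]
        omega
      have e_lo : R''.filter (fun kj => decide (kj.1 < X.1 + 1))
          = R''.filter (fun kj => decide (kj.1 < c))
            ++ (R''.filter (fun kj => decide (c ≤ kj.1))).filter
                (fun y => decide (y.1 < X.1)) := by
        have h0 : R''.filter (fun kj => decide (kj.1 < X.1 + 1))
            = R''.filter (fun y => decide (y.1 < X.1)) := by
          apply List.filter_congr
          intro kj hkj
          have hne := hXne kj hkj
          rw [Bool.eq_iff_iff]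
          simp only [decide_eq_true_eq]
          omega
        rw [h0, sorted_filter_split Prod.fst c (R''.filter (fun y => decide (y.1 < X.1)))
          (List.Pairwise.sublist List.filter_sublist hR''p)]
        congr 1
        · rw [hswap]
          apply List.filter_eq_self.mpr
          intro kj hkj
          have := (List.mem_filter.mp hkj).2
          simp only [decide_eq_true_eq] at this ⊢
          omega
        · rw [hswap]
      rw [hU2, htr, hlor, hWr]
      unfold cyc
      rw [e_hi, e_lo, List.append_assoc]
    · have hX1' : X.1 + 1 = n := by omega
      have hmod : PySem.Int.mod (X.1 + 1) n = 0 := by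
        rw [hX1', PySem.Int.mod_eq_emod_of_pos (by omega)]
        exact Int.emod_self
      rw [hmod]
      have ht0 : t = [] := by
        rw [htr]
        apply List.filter_eq_nil_iff.mpr
        intro kj hkj
        have hb := hRb kj (hsubR'' kj hkj)
        simp only [decide_eq_true_eq]
        omega
      have e_hi0 : R''.filter (fun kj => decide ((0:Int) ≤ kj.1)) = R'' := by
        apply List.filter_eq_self.mpr
        intro kj hkj
        have hb := hRb kj (hsubR'' kj hkj)
        simp only [decide_eq_true_eq]
        omega
      have e_lo0 : R''.filter (fun kj => decide (kj.1 < (0:Int)))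
          = ([] : List (Int × (Int × Int))) := by
        apply List.filter_eq_nil_iff.mpr
        intro kj hkj
        have hb := hRb kj (hsubR'' kj hkj)
        simp only [decide_eq_true_eq]
        omega
      have e_c : R''.filter (fun kj => decide (c ≤ kj.1))
          = (R''.filter (fun kj => decide (c ≤ kj.1))).filter
              (fun y => decide (y.1 < X.1)) := by
        symm
        apply List.filter_eq_self.mpr
        intro kj hkj
        have hm := List.mem_filter.mp hkj
        have hb := hRb kj (hsubR'' kj hm.1)
        have hne := hXne kj hm.1
        simp only [decide_eq_true_eq]
        omega
      rw [hU2, ht0, hlor, hWr]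
      unfold cyc
      rw [e_hi0, e_lo0, List.append_nil, List.nil_append]
      conv_rhs => rw [sorted_filter_split Prod.fst c R'' hR''p]
      rw [← e_c]

lemma filter_swap {α : Type} (p r : α → Bool) (l : List α) :
    (l.filter p).filter r = (l.filter r).filter p := by
  rw [List.filter_filter, List.filter_filter]
  exact List.filter_congr (fun x _ => Bool.and_comm _ _)

lemma altG (job : List (Int × Int)) (pos : Int) :
    ∀ (ql : List Int), ql.Pairwise (fun u v => v < u) →
    (∀ q ∈ ql, (PySem.List.enumerate job 0).filter (fun kj => kj.2.2 == q) ≠ []) →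
    ∀ (c step : Int), 0 ≤ c → c < (job.length : Int) →
    altLevels job pos ((job.length : Int)) ql c step
      = hitRun pos step (printOrder ((cyc c ((PySem.List.enumerate job 0).filter
          (fun kj => decide (kj.2.2 ∈ ql)))).map Prod.snd)) := by
  intro ql
  induction ql with
  | nil =>
    intro _ _ c step hc0 hcn
    have h0 : (PySem.List.enumerate job 0).filter
        (fun kj => decide (kj.2.2 ∈ ([] : List Int))) = [] := by
      apply List.filter_eq_nil_iff.mpr
      intro kj _
      simp
    rw [h0]
    rfl
  | cons q qs ih =>
    intro hpq hcov c step hc0 hcn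
    have hlev : (PySem.List.enumerate job 0).filter (fun kj => kj.2.2 == q) ≠ [] :=
      hcov q (by simp)
    have hdesc : ∀ r ∈ qs, r < q := fun r hr => List.rel_of_pairwise_cons hpq hr
    set E := PySem.List.enumerate job 0 with hE
    have hEp : E.Pairwise (fun u v => u.1 < v.1) := PySem.List.pairwise_lt_enumerate job 0
    have hEb : ∀ kj ∈ E, 0 ≤ kj.1 ∧ kj.1 < (job.length : Int) := by
      intro kj hkj
      rw [hE, PySem.List.mem_enumerate_iff] at hkj
      obtain ⟨k, hk, rfl⟩ := hkj
      constructor <;> [omega; (push_cast; omega)]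
    set R := E.filter (fun kj => decide (kj.2.2 ∈ q :: qs)) with hR
    have hRp : R.Pairwise (fun u v => u.1 < v.1) :=
      List.Pairwise.sublist List.filter_sublist hEp
    have hRb : ∀ kj ∈ R, 0 ≤ kj.1 ∧ kj.1 < (job.length : Int) :=
      fun kj hkj => hEb kj (List.mem_filter.mp hkj).1
    simp only [altLevels, ge_iff_le]
    -- the level list inside the queue
    have hconsq : E.filter (fun kj => kj.2.2 == q) = R.filter (fun kj => kj.2.2 == q) := by
      rw [hR, filter_swap]
      symm
      apply List.filter_eq_self.mpr
      intro kj hkj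
      have := (List.mem_filter.mp hkj).2
      simp at this
      simp [this]
    have hordC : (E.filter (fun kj => kj.2.2 == q)).filter (fun kj => decide (c ≤ kj.1))
          ++ (E.filter (fun kj => kj.2.2 == q)).filter (fun kj => decide (kj.1 < c))
        = (cyc c R).filter (fun kj => kj.2.2 == q) := by
      unfold cyc
      rw [List.filter_append, hconsq,
        filter_swap (fun kj => kj.2.2 == q) (fun kj => decide (c ≤ kj.1)) R,
        filter_swap (fun kj => kj.2.2 == q) (fun kj => decide (kj.1 < c)) R]
    have hCfne : (cyc c R).filter (fun kj => kj.2.2 == q) ≠ [] := by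
      rw [← hordC]
      obtain ⟨kj, hkj⟩ := List.exists_mem_of_ne_nil _ hlev
      intro hnil
      rcases List.append_eq_nil_iff.mp hnil with ⟨h1, h2⟩
      by_cases hck : c ≤ kj.1
      · exact List.filter_eq_nil_iff.mp h1 kj hkj (by simpa using hck)
      · exact List.filter_eq_nil_iff.mp h2 kj hkj (by simp; omega)
    obtain ⟨X, W, U, hCW, hXq, hUq, hXlast⟩ :=
      last_filter_split (fun kj => kj.2.2 == q) (cyc c R) hCfne
    have hordne : (E.filter (fun kj => kj.2.2 == q)).filter (fun kj => decide (c ≤ kj.1))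
          ++ (E.filter (fun kj => kj.2.2 == q)).filter (fun kj => decide (kj.1 < c)) ≠ [] := by
      rw [hordC]; exact hCfne
    have hget : PySem.List.pyGetD
        ((E.filter (fun kj => kj.2.2 == q)).filter (fun kj => decide (c ≤ kj.1))
          ++ (E.filter (fun kj => kj.2.2 == q)).filter (fun kj => decide (kj.1 < c)))
        (-1) (0, (0, 0)) = X := by
      rw [PySem.List.pyGetD_neg_one _ _ hordne]
      have h2 : ((E.filter (fun kj => kj.2.2 == q)).filter (fun kj => decide (c ≤ kj.1))
          ++ (E.filter (fun kj => kj.2.2 == q)).filter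
            (fun kj => decide (kj.1 < c))).getLast? = some X := by
        rw [hordC]; exact hXlast
      rw [List.getLast?_eq_getLast hordne, Option.some.injEq] at h2
      exact h2
    -- decompose the printed order of the current queue
    have hx2 : X.2.2 = q := by simpa using hXq
    have hQW : (cyc c R).map Prod.snd = W.map Prod.snd ++ X.2 :: U.map Prod.snd := by
      rw [hCW]; simp
    have hu' : ∀ y ∈ U.map Prod.snd, y.2 ≠ q := by
      intro y hy
      obtain ⟨kj, hkj, rfl⟩ := List.mem_map.mp hy
      have := List.filter_eq_nil_iff.mp hUq kj hkj
      simpa using this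
    have hball : ∀ y ∈ W.map Prod.snd ++ X.2 :: U.map Prod.snd, y.2 ≤ q := by
      rw [← hQW]
      intro y hy
      obtain ⟨kj, hkj, rfl⟩ := List.mem_map.mp hy
      have hkR : kj ∈ R := by
        unfold cyc at hkj
        rcases List.mem_append.mp hkj with h | h <;> exact (List.mem_filter.mp h).1
      have := (List.mem_filter.mp hkR).2
      simp only [decide_eq_true_eq, List.mem_cons] at this
      rcases this with h | h
      · omega
      · have := hdesc _ h; omega
    have hPO := printOrder_level q (W.map Prod.snd) X.2 (U.map Prod.snd) hx2 hu' hball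
    have hfmapq : ((cyc c R).map Prod.snd).filter (fun y => y.2 == q)
        = ((cyc c R).filter (fun kj => kj.2.2 == q)).map Prod.snd := by
      rw [List.filter_map]
      rfl
    have hfmapnq : U.map Prod.snd ++ (W.map Prod.snd).filter (fun y => !(y.2 == q))
        = (U ++ W.filter (fun kj => !(kj.2.2 == q))).map Prod.snd := by
      rw [List.map_append, List.filter_map]
      rfl
    have hPO' : printOrder ((cyc c R).map Prod.snd)
        = ((cyc c R).filter (fun kj => kj.2.2 == q)).map Prod.snd
          ++ printOrder ((U ++ W.filter (fun kj => !(kj.2.2 == q))).map Prod.snd) := by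
      rw [hQW, hPO, ← hQW, hfmapq, hfmapnq]
    -- the new pointer and the remaining queue
    have hstep := cyc_step q hRp (job.length : Int) c hc0 hcn hRb hCW hXq hUq
    have hR's : R.filter (fun kj => !(kj.2.2 == q))
        = E.filter (fun kj => decide (kj.2.2 ∈ qs)) := by
      rw [hR, List.filter_filter]
      apply List.filter_congr
      intro kj _
      rw [Bool.eq_iff_iff]
      simp only [Bool.and_eq_true, Bool.not_eq_eq_eq_not, Bool.not_true, beq_eq_false_iff_ne,
        ne_eq, decide_eq_true_eq, List.mem_cons]
      constructor
      · rintro ⟨h1, (h2 | h2)⟩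
        · exact absurd h2 h1
        · exact h2
      · intro h
        have := hdesc _ h
        exact ⟨by omega, Or.inr h⟩
    rw [hR's] at hstep
    -- both exits of the level scan
    split
    · rename_i s hscan
      rw [hPO', ← hordC]
      exact (altScan_inl pos _ step s _ hscan).symm
    · rename_i s' hscan
      rw [hget]
      have hn0 : (0:Int) < (job.length : Int) := by omega
      have hc0' : 0 ≤ PySem.Int.mod (X.1 + 1) (job.length : Int) :=
        PySem.Int.mod_nonneg _ hn0
      have hcn' : PySem.Int.mod (X.1 + 1) (job.length : Int) < (job.length : Int) :=
        PySem.Int.mod_lt _ hn0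
      rw [ih (List.Pairwise.of_cons hpq) (fun r hr => hcov r (by simp [hr])) _ s' hc0' hcn']
      rw [hPO', ← hordC, ← hstep]
      exact (altScan_inr pos _ step s' hscan _).symm

lemma length_printOrder : ∀ (n : Nat) (q : List (Int × Int)), q.length = n →
    (printOrder q).length = n := by
  intro n
  induction n using Nat.strong_induction_on with
  | _ n ih =>
    intro q hq
    cases hstep : step1 q with
    | none =>
      have := step1_none.mp hstep
      subst this
      simp at hq
      subst hq
      rfl
    | some r =>
      obtain ⟨x, q'⟩ := r
      have hl := step1_length hstep
      rw [printOrder_cons hstep]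
      have := ih q'.length (by omega) q' rfl
      simp [this]
      omega

lemma hitRun_eq (pos : Int) :
    ∀ (P : List (Int × Int)) (s : Int),
    hitRun pos s P = s + ((min (hit pos P + 1) P.length : Nat) : Int) := by
  intro P
  induction P with
  | nil => intro s; simp [hitRun, hit]
  | cons y t ih =>
    intro s
    by_cases hy : y.1 = pos
    · simp only [hitRun, hit, if_pos hy]
      have hm : min (0 + 1) (y :: t).length = 1 := by simp
      rw [hm]
      push_cast
      ring
    · simp only [hitRun, hit, if_neg hy]
      rw [ih (s + 1)]
      have hm : min (hit pos t + 1 + 1) ((y :: t).length) = min (hit pos t + 1) t.length + 1 := by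
        simp only [List.length_cons]
        omega
      rw [hm]
      push_cast
      ring

lemma processB (job : List (Int × Int)) (nl : List Int) (pos : Int)
    (hne : job ≠ []) :
    process_alt job nl pos = hitRun pos 0 (printOrder job) := by
  unfold process_alt
  rw [PySem.List.len_eq]
  set ql := PySem.List.sorted (PySem.Set.ofList (job.map (fun j => j.2))) (fun x => x) true
    with hql_def
  have hqlmem : ∀ x, x ∈ ql ↔ x ∈ job.map (fun j => j.2) := by
    intro x
    rw [hql_def]
    rw [List.Perm.mem_iff (PySem.List.sorted_perm _ _ _)]
    exact PySem.Set.mem_ofList _ _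
  have hql : ql.Pairwise (fun u v => v < u) := by
    have h1 : ql.Pairwise (fun u v => v ≤ u) := PySem.List.sorted_pairwise_rev _ _
    have h2 : ql.Nodup := by
      rw [hql_def]
      exact (PySem.List.sorted_perm _ _ _).nodup_iff.mpr (PySem.Set.nodup_ofList _)
    exact (h1.and h2).imp (by rintro a b ⟨hle, hne'⟩; omega)
  have hcov : ∀ q ∈ ql, (PySem.List.enumerate job 0).filter (fun kj => kj.2.2 == q) ≠ [] := by
    intro q hq
    rw [hqlmem] at hq
    obtain ⟨y, hy, rfl⟩ := List.mem_map.mp hq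
    obtain ⟨k, hk, rfl⟩ := List.getElem_of_mem hy
    apply List.ne_nil_of_mem (a := ((k : Int), job[k]))
    rw [List.mem_filter]
    constructor
    · rw [PySem.List.mem_enumerate_iff]
      exact ⟨k, hk, by simp⟩
    · simp
  have hn0 : 0 < job.length := List.length_pos_of_ne_nil hne
  rw [altG job pos ql hql hcov 0 0 le_rfl (by push_cast; omega)]
  have hfall : (PySem.List.enumerate job 0).filter (fun kj => decide (kj.2.2 ∈ ql))
      = PySem.List.enumerate job 0 := by
    apply List.filter_eq_self.mpr
    intro kj hkj
    rw [PySem.List.mem_enumerate_iff] at hkj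
    obtain ⟨k, hk, rfl⟩ := hkj
    simp only [decide_eq_true_eq]
    rw [hqlmem]
    exact List.mem_map.mpr ⟨job[k], List.getElem_mem hk, rfl⟩
  have hbnd : ∀ kj ∈ PySem.List.enumerate job 0, 0 ≤ kj.1 := by
    intro kj hkj
    rw [PySem.List.mem_enumerate_iff] at hkj
    obtain ⟨k, hk, rfl⟩ := hkj
    omega
  have hcyc0 : cyc 0 (PySem.List.enumerate job 0) = PySem.List.enumerate job 0 := by
    unfold cyc
    rw [List.filter_eq_self.mpr (by intro kj hkj; simpa using hbnd kj hkj),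
        List.filter_eq_nil_iff.mpr (by intro kj hkj; have := hbnd kj hkj; simp; omega)]
    simp
  rw [hfall, hcyc0]
  have hms : List.map Prod.snd (PySem.List.enumerate job 0) = job :=
    PySem.List.map_snd_enumerate job 0
  rw [hms]

lemma printOrder_singleton (x : Int × Int) : printOrder [x] = [x] := by
  have hs : step1 ([] ++ x :: []) = some (x, [] ++ []) :=
    step1_shape x.2 rfl (by simp) (by intro y hy; simp at hy; simp [hy])
  simp only [List.nil_append, List.append_nil] at hs
  rw [printOrder_cons hs]
  rfl

-- ===== VERDICT (by name: the statement is the Claim_ definition above) =====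
theorem process_spec : Claim_unchanged_process := by
  intro job nl pos hdom hpre
  intro hD
  have hne : job ≠ [] := fun h => hD h
  unfold Pre_process at hpre
  by_cases hsmall : job.length ≤ 1
  · -- at most one job: A exits its loop at once with cur = 1, B prints the single job first
    obtain ⟨x, hx⟩ : ∃ x, job = [x] := by
      cases job with
      | nil => exact absurd rfl hne
      | cons x t =>
        cases t with
        | nil => exact ⟨x, rfl⟩
        | cons y u => simp at hsmall
    subst hx
    have h1 : process [x] nl pos = 1 := by
      norm_num [process, processLoop, PySem.List.len_eq]
    have h2 : process_alt [x] nl pos = 1 := by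
      rw [processB [x] nl pos (by simp), printOrder_singleton]
      by_cases hx1 : x.1 = pos <;> simp [hitRun, hx1]
    rw [h1, h2]
  · have hcp : ConsHist nl job ∧ PrioOK job := hpre.resolve_left hsmall
    have hc := hcp.1
    have hp := hcp.2
    rw [processA job nl pos hc hp, processB job nl pos hne, hitRun_eq]
    rw [length_printOrder job.length job rfl]
    have h1 : 1 ≤ job.length := List.length_pos_of_ne_nil hne
    rcases Nat.le_total (hit pos (printOrder job)) (job.length - 1) with hle | hge
    · rw [min_eq_left hle, min_eq_left (by omega)]
      push_cast
      ring
    · rw [min_eq_right hge, min_eq_right (by omega)]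
      push_cast [h1]
      omega

theorem process_changed : Claim_changed_process := by
  unfold Claim_changed_process; decide

theorem process_tight : Claim_exact_process := by
  intro job nl pos hdom hpre hD
  have hj : job = [] := hD
  subst hj
  have h1 : process [] nl pos = 1 := by
    norm_num [process, processLoop, PySem.List.len_eq]
  have h2 : process_alt [] nl pos = 0 := rfl
  rw [h1, h2]
  decide
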